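-- pv_equiv track=rewrite | github.com/jkpr/advent-of-code-2015 | aoc2015/day11/__init__.py | get_next_non_i_o_l
-- ===== SOURCE A (Python) =====
-- def get_next_non_i_o_l(word: str) -> str:
--     new = []
--     for ch in word:
--         if ch == "i":
--             new.append("j")
--             break
--         if ch == "o":
--             new.append("p")
--             break
--         if ch == "l":
--             new.append("m")
--             break
--         new.append(ch)
--     while len(new) < len(word):
--         new.append("a")
--     return "".join(new)
-- ===== SOURCE B (Python) =====
-- def get_next_non_i_o_l(word: str) -> str:
--     mapping = {"i": "j", "o": "p", "l": "m"}
--     i = next((k for k, ch in enumerate(word) if ch in mapping), None)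
--     if i is None:
--         return word
--     return word[:i] + mapping[word[i]] + "a" * (len(word) - i - 1)
-- ===== Notes on version B (the rewrite author's own statement) =====
-- stated objective: simpler
-- what changed: Replaces the accumulate-with-break loop plus while-pad with a locate-then-build decomposition: find the index of the first forbidden letter, then return the untouched prefix, the mapped letter, and the pad fill built in one step by string multiplication.
import Mathlib
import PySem

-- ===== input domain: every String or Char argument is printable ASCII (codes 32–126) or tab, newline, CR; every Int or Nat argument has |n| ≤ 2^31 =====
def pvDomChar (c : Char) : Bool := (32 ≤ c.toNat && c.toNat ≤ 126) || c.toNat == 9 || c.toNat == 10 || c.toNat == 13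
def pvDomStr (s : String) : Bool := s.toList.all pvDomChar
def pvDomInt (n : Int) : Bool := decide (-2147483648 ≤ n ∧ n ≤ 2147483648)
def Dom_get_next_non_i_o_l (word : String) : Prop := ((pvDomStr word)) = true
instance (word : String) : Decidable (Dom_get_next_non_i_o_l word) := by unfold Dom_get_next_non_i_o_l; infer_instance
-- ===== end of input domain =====

-- B replaces A's accumulate-with-break loop plus while-pad by a locate-then-build
-- decomposition (find first forbidden index, then prefix ++ mapped char ++ replicated pad); simpler, same cost.

-- ===== PORT A =====
-- the for-loop with break: collect chars until the first of i/o/l, which is replaced and stops the loop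
def pvGoA : List Char → List Char
  | [] => []
  | c :: rest =>
    if c = 'i' then ['j']
    else if c = 'o' then ['p']
    else if c = 'l' then ['m']
    else c :: pvGoA rest

-- the while-loop: append 'a' until the target length is reached
def pvPadA (target : Nat) (new : List Char) : List Char :=
  if new.length < target then pvPadA target (new ++ ['a']) else new
termination_by target - new.length
decreasing_by simp; omega

def get_next_non_i_o_l (word : String) : String :=
  String.ofList (pvPadA word.toList.length (pvGoA word.toList))

-- ===== PORT B =====
def pvMapping : List (Char × Char) := [('i', 'j'), ('o', 'p'), ('l', 'm')]

def get_next_non_i_o_l_alt (word : String) : String :=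
  let cs := word.toList
  match cs.findIdx? (fun ch => (pvMapping.lookup ch).isSome) with
  | none => word
  | some i =>
      String.ofList (cs.take i ++ ((pvMapping.lookup (cs.getD i 'a')).getD 'a'
        :: List.replicate (cs.length - i - 1) 'a'))

-- ===== PRECONDITION & SPEC =====
def Spec_get_next_non_i_o_l (word : String) (out : String) : Prop := out = get_next_non_i_o_l_alt word
instance (word : String) (out : String) : Decidable (Spec_get_next_non_i_o_l word out) := by unfold Spec_get_next_non_i_o_l; infer_instance

-- ===== CLAIM (what is proved, stated in full; the proofs are below) =====
def Claim_equal_get_next_non_i_o_l : Prop := ∀ (word : String), Dom_get_next_non_i_o_l word → Spec_get_next_non_i_o_l word (get_next_non_i_o_l word)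

-- ===== LEMMAS AND PROOFS =====
theorem pvPadA_eq (t : Nat) (new : List Char) :
    pvPadA t new = new ++ List.replicate (t - new.length) 'a' := by
  unfold pvPadA
  split
  next h =>
    rw [pvPadA_eq t (new ++ ['a'])]
    have h2 : t - new.length = (t - (new.length + 1)) + 1 := by omega
    simp [h2, List.replicate_succ, List.append_assoc]
  next h =>
    have h2 : t - new.length = 0 := by omega
    simp [h2]
termination_by t - new.length
decreasing_by simp; omega

theorem pvGoA_len_le (cs : List Char) : (pvGoA cs).length ≤ cs.length := by
  induction cs with
  | nil => simp [pvGoA]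
  | cons c rest ih =>
    simp only [pvGoA]
    split_ifs <;> (simp; try omega)

theorem pv_main (cs : List Char) :
    pvPadA cs.length (pvGoA cs) =
      match cs.findIdx? (fun ch => (pvMapping.lookup ch).isSome) with
      | none => cs
      | some i =>
          cs.take i ++ ((pvMapping.lookup (cs.getD i 'a')).getD 'a'
            :: List.replicate (cs.length - i - 1) 'a') := by
  induction cs with
  | nil => simp [pvGoA, pvPadA]
  | cons c rest ih =>
    rw [List.findIdx?_cons]
    by_cases hi : c = 'i'
    · subst hi
      rw [show pvGoA ('i' :: rest) = ['j'] from rfl, pvPadA_eq]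
      simp [pvMapping]
    · by_cases ho : c = 'o'
      · subst ho
        rw [show pvGoA ('o' :: rest) = ['p'] from rfl, pvPadA_eq]
        simp [pvMapping, List.lookup]
      · by_cases hl : c = 'l'
        · subst hl
          rw [show pvGoA ('l' :: rest) = ['m'] from rfl, pvPadA_eq]
          simp [pvMapping, List.lookup]
        · have hp : (pvMapping.lookup c).isSome = false := by
            have h1 : (c == 'i') = false := by simp [hi]
            have h2 : (c == 'o') = false := by simp [ho]
            have h3 : (c == 'l') = false := by simp [hl]
            simp [pvMapping, List.lookup, h1, h2, h3]
          have hg : pvGoA (c :: rest) = c :: pvGoA rest := by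
            simp [pvGoA, hi, ho, hl]
          have hlen := pvGoA_len_le rest
          rw [hg, pvPadA_eq]
          rw [pvPadA_eq] at ih
          simp only [List.length_cons, hp, Bool.false_eq_true, if_false]
          cases hfi : rest.findIdx? (fun ch => (pvMapping.lookup ch).isSome) with
          | none =>
            rw [hfi] at ih
            simp only [Option.map_none, List.cons_append]
            rw [show rest.length + 1 - ((pvGoA rest).length + 1) = rest.length - (pvGoA rest).length by omega]
            rw [ih]
          | some j =>
            rw [hfi] at ih
            simp only [Option.map_some, List.cons_append]
            rw [show rest.length + 1 - ((pvGoA rest).length + 1) = rest.length - (pvGoA rest).length by omega]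
            rw [ih,
              show rest.length + 1 - (j + 1) - 1 = rest.length - j - 1 by omega]
            simp [List.take_succ_cons]

-- ===== VERDICT (by name: the statement is the Claim_ definition above) =====
theorem get_next_non_i_o_l_spec : Claim_equal_get_next_non_i_o_l := by
  intro word _
  unfold Spec_get_next_non_i_o_l get_next_non_i_o_l get_next_non_i_o_l_alt
  rw [pv_main word.toList]
  cases h : word.toList.findIdx? (fun ch => (pvMapping.lookup ch).isSome) <;>
    simp [h, String.ofList_toList]
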